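-- pv_equiv track=rewrite | github.com/chrisgalea06/maltese-sentiment-analyser | Scripts/Dataset_Bilingual/bible_scraping.py | parse_text_maltese
-- ===== SOURCE A (Python) =====
-- def parse_text_maltese(text):
--     chapter_content = []
--     lines = text.splitlines()
--     current = ''
--     count = 0
--     for line in lines:
--         if line.isnumeric():
--             if count > 0:
--                 chapter_content.append((count, current))
--                 current = ''
--             count += 1
--         else:
--             current = current + ' ' + line
--     chapter_content.append((count, current))
--
--     return chapter_content
-- ===== SOURCE B (Python) =====
-- def parse_text_maltese(text):
--     lines = text.splitlines()
--     # one backward pass: collect the segment of text lines following each numeric marker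
--     cur = []    # lines of the segment currently being collected (in reverse)
--     segs = []   # segments after each numeric line, last marker first
--     for line in reversed(lines):
--         if line.isnumeric():
--             segs.append(cur[::-1])
--             cur = []
--         else:
--             cur.append(line)
--     segs.reverse()
--     pre = cur[::-1]  # lines before the first numeric line
--     if not segs:
--         return [(0, ''.join(' ' + l for l in pre))]
--     segs[0] = pre + segs[0]
--     return [(i, ''.join(' ' + l for l in s)) for i, s in enumerate(segs, 1)]
-- ===== Notes on version B (the rewrite author's own statement) =====
-- stated objective: alternative
-- what changed: A emits verses on the fly from a forward loop with a growing string accumulator; B makes one backward pass that splits the lines into segments at the numeric markers and then joins and numbers each segment once.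
import Mathlib
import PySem

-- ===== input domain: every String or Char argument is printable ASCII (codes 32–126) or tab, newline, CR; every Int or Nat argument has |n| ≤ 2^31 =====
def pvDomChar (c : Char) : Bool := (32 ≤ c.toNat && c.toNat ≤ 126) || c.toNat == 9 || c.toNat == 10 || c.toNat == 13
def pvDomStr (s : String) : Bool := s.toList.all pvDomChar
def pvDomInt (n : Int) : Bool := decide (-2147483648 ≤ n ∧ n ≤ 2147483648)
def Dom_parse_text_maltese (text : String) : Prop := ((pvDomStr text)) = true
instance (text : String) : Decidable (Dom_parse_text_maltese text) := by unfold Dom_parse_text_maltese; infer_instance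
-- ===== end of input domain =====

-- B replaces A's forward accumulator loop by a single backward pass that splits the lines
-- into segments at the numeric markers and joins each segment once (objective: alternative).

-- ===== PORT A =====
-- A's loop body; str.isnumeric coincides with str.isdigit on the printable-ASCII domain (Dom_),
-- so it is ported as PySem.Str.strIsdigit.
def pvStepA (st : List (Int × String) × String × Int) (line : String) :
    List (Int × String) × String × Int :=
  match st with
  | (cc, cur, cnt) =>
    if PySem.Str.strIsdigit line then
      if cnt > 0 then (cc ++ [(cnt, cur)], "", cnt + 1) else (cc, cur, cnt + 1)
    else (cc, cur ++ " " ++ line, cnt)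

def parse_text_maltese (text : String) : List (Int × String) :=
  let lines := PySem.Str.splitlines text
  let st := lines.foldl pvStepA ([], "", 0)
  st.1 ++ [(st.2.2, st.2.1)]

-- ===== PORT B =====
-- ''.join(' ' + l for l in s): concatenation of " " ++ l over the segment, ported step for step (exact)
def pvJoinSp : List String → String
  | [] => ""
  | l :: ls => " " ++ l ++ pvJoinSp ls

-- B's backward-loop body
def pvStepB (st : List String × List (List String)) (line : String) :
    List String × List (List String) :=
  match st with
  | (cur, segs) =>
    if PySem.Str.strIsdigit line then ([], segs ++ [cur.reverse]) else (cur ++ [line], segs)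

-- port of B's final comprehension '[(i, join(s)) for i, s in enumerate(segs, 1)]'
def pvEnumFrom (n : Int) : List (List String) → List (Int × String)
  | [] => []
  | s :: rest => (n, pvJoinSp s) :: pvEnumFrom (n + 1) rest

def parse_text_maltese_alt (text : String) : List (Int × String) :=
  let lines := PySem.Str.splitlines text
  let st := lines.reverse.foldl pvStepB ([], [])
  let segs := st.2.reverse
  let pre := st.1.reverse
  match segs with
  | [] => [(0, pvJoinSp pre)]
  | s0 :: rest => pvEnumFrom 1 ((pre ++ s0) :: rest)

-- ===== PRECONDITION & SPEC =====
def Spec_parse_text_maltese (text : String) (out : List (Int × String)) : Prop := out = parse_text_maltese_alt text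
instance (text : String) (out : List (Int × String)) : Decidable (Spec_parse_text_maltese text out) := by unfold Spec_parse_text_maltese; infer_instance

-- ===== CLAIM (what is proved, stated in full; the proofs are below) =====
def Claim_equal_parse_text_maltese : Prop := ∀ (text : String), Dom_parse_text_maltese text → Spec_parse_text_maltese text (parse_text_maltese text)

-- ===== LEMMAS AND PROOFS =====

-- the segment structure both programs compute: (lines before the first numeric line,
-- list of the segments of non-numeric lines following each numeric line)
def pvSplit : List String → List String × List (List String)
  | [] => ([], [])
  | l :: ls =>
    let r := pvSplit ls
    if PySem.Str.strIsdigit l then ([], r.1 :: r.2) else (l :: r.1, r.2)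

theorem pvJoinSp_append (p q : List String) :
    pvJoinSp (p ++ q) = pvJoinSp p ++ pvJoinSp q := by
  induction p with
  | nil => simp [pvJoinSp, String.empty_append]
  | cons l p ih => simp [pvJoinSp, ih, String.append_assoc]

-- B's backward fold computes pvSplit (up to the final reversals)
theorem pvFoldB_eq_split (ls : List String) :
    ((ls.reverse.foldl pvStepB ([], [])).1.reverse,
     (ls.reverse.foldl pvStepB ([], [])).2.reverse) = pvSplit ls := by
  induction ls with
  | nil => simp [pvSplit]
  | cons l ls ih =>
    simp only [List.reverse_cons, List.foldl_append, List.foldl_cons, List.foldl_nil]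
    simp only [pvStepB, pvSplit]
    rcases h : PySem.Str.strIsdigit l with _ | _
    · simp only [if_false, Bool.false_eq_true, ← ih]
      simp
    · simp only [if_true, ← ih]
      simp

-- A's fold once count ≥ 1, characterised by pvSplit
theorem pvFoldA_pos (ls : List String) :
    ∀ (acc : List (Int × String)) (cur : String) (cnt : Int), 1 ≤ cnt →
    (let st := ls.foldl pvStepA (acc, cur, cnt); st.1 ++ [(st.2.2, st.2.1)]) =
      acc ++ (cnt, cur ++ pvJoinSp (pvSplit ls).1) :: pvEnumFrom (cnt + 1) (pvSplit ls).2 := by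
  induction ls with
  | nil => intro acc cur cnt h; simp [pvSplit, pvJoinSp, pvEnumFrom]
  | cons l ls ih =>
    intro acc cur cnt h
    simp only [List.foldl_cons, pvStepA, pvSplit]
    rcases hd : PySem.Str.strIsdigit l with _ | _
    · simp only [if_false, Bool.false_eq_true]
      have h2 := ih acc (cur ++ " " ++ l) cnt h
      simp only [String.append_assoc] at h2
      simpa [pvJoinSp, String.append_assoc] using h2
    · have hc : cnt > 0 := by omega
      simp only [if_true, if_pos hc]
      have h2 := ih (acc ++ [(cnt, cur)]) "" (cnt + 1) (by omega)
      simp only [h2, pvJoinSp, pvEnumFrom, String.empty_append, String.append_empty,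
        List.append_assoc, List.cons_append, List.nil_append]

-- A's fold from the initial count 0, characterised by pvSplit
theorem pvFoldA_zero (ls : List String) :
    ∀ (cur : String),
    (let st := ls.foldl pvStepA ([], cur, 0); st.1 ++ [(st.2.2, st.2.1)]) =
      (match pvSplit ls with
       | (p, []) => [(0, cur ++ pvJoinSp p)]
       | (p, s1 :: ss) => (1, cur ++ pvJoinSp p ++ pvJoinSp s1) :: pvEnumFrom 2 ss) := by
  induction ls with
  | nil => intro cur; simp [pvSplit, pvJoinSp]
  | cons l ls ih =>
    intro cur
    simp only [List.foldl_cons, pvStepA, pvSplit]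
    rcases hd : PySem.Str.strIsdigit l with _ | _
    · simp only [if_false, Bool.false_eq_true]
      have := ih (cur ++ " " ++ l)
      simp only [this]
      rcases hs : pvSplit ls with ⟨p, ss⟩
      cases ss <;> simp [pvJoinSp, String.append_assoc]
    · simp only [if_true, show ¬((0:Int) > 0) by omega, if_false]
      have h2 := pvFoldA_pos ls [] cur 1 (by omega)
      simp only [List.nil_append] at h2
      simp only [show (0:Int) + 1 = 1 from rfl, h2]
      simp [pvJoinSp, String.append_empty]

-- ===== VERDICT (by name: the statement is the Claim_ definition above) =====
theorem parse_text_maltese_spec : Claim_equal_parse_text_maltese := by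
  intro text _
  unfold Spec_parse_text_maltese parse_text_maltese parse_text_maltese_alt
  have hB := pvFoldB_eq_split (PySem.Str.splitlines text)
  have hA := pvFoldA_zero (PySem.Str.splitlines text) ""
  simp only [String.empty_append] at hA
  simp only [hA]
  have h1 : ((PySem.Str.splitlines text).reverse.foldl pvStepB ([], [])).1.reverse
      = (pvSplit (PySem.Str.splitlines text)).1 := by rw [← hB]
  have h2 : ((PySem.Str.splitlines text).reverse.foldl pvStepB ([], [])).2.reverse
      = (pvSplit (PySem.Str.splitlines text)).2 := by rw [← hB]
  simp only [h1, h2]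
  rcases hs : pvSplit (PySem.Str.splitlines text) with ⟨p, ss⟩
  cases ss with
  | nil => simp
  | cons s1 rest => simp [pvEnumFrom, pvJoinSp_append]
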